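-- pv_equiv track=rewrite | github.com/MrBrantCode/unitest_baseline | mut_generate/mist_train_cf/cf_94150/solution.py | compare_strings
-- ===== SOURCE A (Python) =====
-- def compare_strings(str1, str2):
--     str1 = str1.lower()  # Convert to lowercase
--     str2 = str2.lower()
--
--     # Iterate over each character of the strings
--     for i in range(min(len(str1), len(str2))):
--         # Compare the characters
--         if str1[i] < str2[i]:
--             return -1
--         elif str1[i] > str2[i]:
--             return 1
--
--     # If one string is a prefix of the other, the longer string is considered greater
--     if len(str1) < len(str2):
--         return -1
--     elif len(str1) > len(str2):
--         return 1
--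
--     # The strings are equal
--     return 0
-- ===== SOURCE B (Python) =====
-- def compare_strings(str1, str2):
--     str1 = str1.lower()
--     str2 = str2.lower()
--     return (str1 > str2) - (str1 < str2)
-- ===== Notes on version B (the rewrite author's own statement) =====
-- stated objective: idiomatic
-- what changed: Replaced the explicit per-character loop and manual length tie-break with Python's native lexicographic string comparison, computed in one arithmetic step (str1 > str2) - (str1 < str2).
import Mathlib
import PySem

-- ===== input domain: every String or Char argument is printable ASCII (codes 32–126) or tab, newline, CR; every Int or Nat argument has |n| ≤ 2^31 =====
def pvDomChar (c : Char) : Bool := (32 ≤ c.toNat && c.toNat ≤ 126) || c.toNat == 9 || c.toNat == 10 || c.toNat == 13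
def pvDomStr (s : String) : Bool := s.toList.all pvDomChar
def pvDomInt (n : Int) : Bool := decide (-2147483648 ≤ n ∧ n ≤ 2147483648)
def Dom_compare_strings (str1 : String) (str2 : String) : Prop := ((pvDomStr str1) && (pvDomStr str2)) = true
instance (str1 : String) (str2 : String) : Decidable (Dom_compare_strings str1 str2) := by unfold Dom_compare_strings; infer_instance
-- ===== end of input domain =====

-- B replaces A's per-character loop and manual length tie-break with Python's native
-- lexicographic string comparison, computed as (str1 > str2) - (str1 < str2).


-- ===== PORT A =====
-- A: lowercase both, scan characters left-to-right (the for-loop over range(min(len,len))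
-- becomes simultaneous structural recursion on the two char lists), then the length tie-break.
def compareLoopA : List Char → List Char → Int
  | a :: t1, b :: t2 =>
      if a < b then -1
      else if b < a then 1
      else compareLoopA t1 t2
  | l1, l2 =>
      if l1.length < l2.length then -1
      else if l2.length < l1.length then 1
      else 0

def compare_strings (str1 : String) (str2 : String) : Int :=
  compareLoopA (PySem.Str.lower str1).toList (PySem.Str.lower str2).toList

-- ===== PORT B =====
-- B: lowercase both, then Python's native lexicographic comparison: (s1 > s2) - (s1 < s2).
def compare_strings_alt (str1 : String) (str2 : String) : Int :=
  let s1 := PySem.Str.lower str1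
  let s2 := PySem.Str.lower str2
  (if s2 < s1 then (1 : Int) else 0) - (if s1 < s2 then (1 : Int) else 0)

-- ===== PRECONDITION & SPEC =====
def Spec_compare_strings (str1 : String) (str2 : String) (out : Int) : Prop := out = compare_strings_alt str1 str2
instance (str1 : String) (str2 : String) (out : Int) : Decidable (Spec_compare_strings str1 str2 out) := by unfold Spec_compare_strings; infer_instance

-- ===== CLAIM (what is proved, stated in full; the proofs are below) =====
def Claim_equal_compare_strings : Prop := ∀ (str1 : String) (str2 : String), Dom_compare_strings str1 str2 → Spec_compare_strings str1 str2 (compare_strings str1 str2)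

-- ===== LEMMAS AND PROOFS =====

-- A's scan-plus-tiebreak equals the native lexicographic comparison on char lists.
theorem compareLoopA_eq_lex : ∀ l1 l2 : List Char,
    compareLoopA l1 l2 = (if l2 < l1 then (1:Int) else 0) - (if l1 < l2 then 1 else 0)
  | [], [] => by simp [compareLoopA]
  | [], b :: t2 => by simp [compareLoopA]
  | a :: t1, [] => by simp [compareLoopA]
  | a :: t1, b :: t2 => by
    by_cases h1 : a < b
    · simp [compareLoopA, h1, List.cons_lt_cons_iff, asymm h1, (ne_of_lt h1).symm]
    · by_cases h2 : b < a
      · simp [compareLoopA, h1, h2, List.cons_lt_cons_iff, ne_of_gt h2]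
      · have hab : a = b := le_antisymm (not_lt.1 h2) (not_lt.1 h1)
        subst hab
        simpa [compareLoopA, List.cons_lt_cons_iff] using compareLoopA_eq_lex t1 t2

-- ===== VERDICT (by name: the statement is the Claim_ definition above) =====
theorem compare_strings_spec : Claim_equal_compare_strings := by
  intro str1 str2 _
  unfold Spec_compare_strings compare_strings compare_strings_alt
  simp only [String.lt_iff_toList_lt]
  exact compareLoopA_eq_lex _ _
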